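-- pv_equiv track=rewrite | github.com/gamamoe/ace-the-coding-interviews | Youngsu/Week3/Q16.py | solution
-- ===== SOURCE A (Python) =====
-- def solution(progresses, speeds):
--     answer = []
--     n = len(progresses)
--
--     while n > 0:
--         while progresses[0] < 100:
--             for i in range(n):
--                 progresses[i] += speeds[i]
--         complete = 0
--         for _ in range(n):
--             if progresses[0] >= 100:
--                 complete += 1
--                 progresses.pop(0)
--                 speeds.pop(0)
--                 n -= 1
--             else:
--                 continue
--         answer.append(complete)
--     return answer
-- ===== SOURCE B (Python) =====
-- def solution(progresses, speeds):
--     answer = []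
--     cur = None
--     count = 0
--     for p, s in zip(progresses, speeds):
--         d = 0 if p >= 100 else -((p - 100) // s)
--         if cur is None or d > cur:
--             if count:
--                 answer.append(count)
--             cur = d
--             count = 1
--         else:
--             count += 1
--     if count:
--         answer.append(count)
--     return answer
-- ===== Notes on version B (the rewrite author's own statement) =====
-- stated objective: faster
-- what changed: Replaces A's day-by-day simulation with repeated pop(0) by a closed-form ceiling-division of the days each task needs and a single running-max grouping pass over the zipped lists.
-- outside the precondition, e.g. on solution([100], [-1]): A returns [1], B returns [1]
import Mathlib
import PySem

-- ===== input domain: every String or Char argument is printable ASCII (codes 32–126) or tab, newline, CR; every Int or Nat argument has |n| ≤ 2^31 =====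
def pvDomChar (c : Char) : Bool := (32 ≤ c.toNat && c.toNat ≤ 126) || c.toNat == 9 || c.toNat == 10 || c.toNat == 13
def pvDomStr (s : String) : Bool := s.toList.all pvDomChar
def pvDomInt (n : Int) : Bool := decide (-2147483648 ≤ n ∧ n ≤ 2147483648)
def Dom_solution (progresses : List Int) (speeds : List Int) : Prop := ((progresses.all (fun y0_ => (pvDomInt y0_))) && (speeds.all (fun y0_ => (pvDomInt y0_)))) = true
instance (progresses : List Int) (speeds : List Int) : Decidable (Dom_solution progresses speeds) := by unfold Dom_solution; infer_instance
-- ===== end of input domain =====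

-- B replaces A's day-by-day simulation (with repeated pop(0)) by a closed-form ceiling division of
-- each task's remaining days and a single running-max grouping pass: objective 'faster'.
-- A mutates its arguments in place (increments and pops them); the equivalence is about the RETURN value only.

-- ===== PORT A =====
-- inner 'while progresses[0] < 100: for i in range(n): progresses[i] += speeds[i]'
-- (fuel only makes the loop total; under Pre_ and Dom_ the loop needs at most 2^31+100 < 2^32 passes)
def pvAdvance (fuel : Nat) (progs speeds : List Int) : List Int :=
  match fuel, progs with
  | 0, _ => progs
  | _, [] => progs
  | f + 1, p :: ps =>
      if p < 100 then pvAdvance f (List.zipWith (· + ·) (p :: ps) speeds) speeds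
      else p :: ps

-- 'for _ in range(n): if progresses[0] >= 100: complete += 1; pop both; else: continue'
def pvPop : Nat → List Int → List Int → Int → Int × List Int × List Int
  | 0, progs, speeds, c => (c, progs, speeds)
  | k + 1, p :: ps, s :: ss, c =>
      if p ≥ 100 then pvPop k ps ss (c + 1) else pvPop k (p :: ps) (s :: ss) c
  | _ + 1, progs, speeds, c => (c, progs, speeds)

-- outer 'while n > 0' (each cycle pops at least one task, so the initial n bounds the cycles)
def pvOuter : Nat → List Int → List Int → List Int → List Int
  | 0, _, _, answer => answer
  | f + 1, progs, speeds, answer =>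
      if progs.length > 0 then
        let progs' := pvAdvance (2 ^ 32) progs speeds
        let r := pvPop progs'.length progs' speeds 0
        pvOuter f r.2.1 r.2.2 (answer ++ [r.1])
      else answer

def solution (progresses : List Int) (speeds : List Int) : List Int :=
  pvOuter progresses.length progresses speeds []

-- ===== PORT B =====
-- the body of Source B's single loop: d = days to finish, start a new group when d exceeds the running max
def pvBStep (acc : List Int × Option Int × Int) (e : Int × Int) : List Int × Option Int × Int :=
  let d : Int := if e.1 ≥ 100 then 0 else -(PySem.Int.floordiv (e.1 - 100) e.2)
  match acc.2.1 with
  | none => (acc.1, some d, 1)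
  | some c => if d > c then (acc.1 ++ [acc.2.2], some d, 1) else (acc.1, some c, acc.2.2 + 1)

def solution_alt (progresses : List Int) (speeds : List Int) : List Int :=
  let st := (progresses.zip speeds).foldl pvBStep ([], none, 0)
  if st.2.2 ≠ 0 then st.1 ++ [st.2.2] else st.1

-- ===== PRECONDITION & SPEC =====
-- Pre_ excludes inputs where A does not return normally: a speeds list shorter than progresses
-- (IndexError on progresses[i] += speeds[i] or speeds.pop(0)), and tasks whose speed is not positive
-- unless they are already finished with a non-negative speed — on those A's simulation can loop forever
-- (e.g. ([0],[0]) or ([0,100],[1,-1]) never terminate); on part of that class A happens to return.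
def Pre_solution (progresses : List Int) (speeds : List Int) : Prop :=
  progresses.length ≤ speeds.length ∧
  ∀ e ∈ progresses.zip speeds, 0 < e.2 ∨ (100 ≤ e.1 ∧ 0 ≤ e.2)
instance (progresses : List Int) (speeds : List Int) : Decidable (Pre_solution progresses speeds) := by
  unfold Pre_solution; infer_instance

def pvWitness_solution : List Int × List Int := ([93, 30, 55], [1, 30, 5])

def Spec_solution (progresses : List Int) (speeds : List Int) (out : List Int) : Prop := out = solution_alt progresses speeds
instance (progresses : List Int) (speeds : List Int) (out : List Int) : Decidable (Spec_solution progresses speeds out) := by unfold Spec_solution; infer_instance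

-- ===== CLAIM (what is proved, stated in full; the proofs are below) =====
def Claim_equal_solution : Prop := ∀ (progresses : List Int) (speeds : List Int), Dom_solution progresses speeds → Pre_solution progresses speeds → Spec_solution progresses speeds (solution progresses speeds)

-- ===== LEMMAS AND PROOFS =====

-- days a task (p, s) needs until p + d*s ≥ 100, as Source B computes it
def pvDays (e : Int × Int) : Int := if e.1 ≥ 100 then 0 else -(PySem.Int.floordiv (e.1 - 100) e.2)

-- running-max grouping of the days list: a group is its leader plus the following elements ≤ leader
def pvGref : List Int → List Int
  | [] => []
  | d :: ds =>
      (1 + ((ds.takeWhile (fun x => x ≤ d)).length : Int)) :: pvGref (ds.dropWhile (fun x => x ≤ d))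
termination_by l => l.length
decreasing_by
  have := List.length_dropWhile_le (p := fun x => decide (x ≤ d)) (l := ds)
  simp only [List.length_cons]
  omega

def pvGood (L : List (Int × Int)) : Prop := ∀ e ∈ L, 0 < e.2 ∨ (100 ≤ e.1 ∧ 0 ≤ e.2)

def pvShift (t : Int) (e : Int × Int) : Int := e.1 + t * e.2

lemma pvDays_nonneg (e : Int × Int) (h : 0 < e.2 ∨ (100 ≤ e.1 ∧ 0 ≤ e.2)) : 0 ≤ pvDays e := by
  unfold pvDays
  split_ifs with h1
  · exact le_refl _
  · have hpos : 0 < e.2 := by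
      rcases h with h | h
      · exact h
      · omega
    have h2 : PySem.Int.floordiv (e.1 - 100) e.2 < 1 := by
      rw [PySem.Int.floordiv_lt_iff_lt_mul hpos]
      omega
    omega

lemma pvDays_ub (e : Int × Int) (h : 0 < e.2 ∨ (100 ≤ e.1 ∧ 0 ≤ e.2)) (hp : -2147483648 ≤ e.1) :
    pvDays e ≤ 2 ^ 32 := by
  unfold pvDays
  split_ifs with h1
  · norm_num
  · have hpos : 0 < e.2 := by
      rcases h with h | h
      · exact h
      · omega
    have h2 : -(2 ^ 32) ≤ PySem.Int.floordiv (e.1 - 100) e.2 := by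
      rw [PySem.Int.le_floordiv_iff_mul_le hpos]
      nlinarith [mul_le_mul_of_nonneg_left (show (1:Int) ≤ e.2 by omega) (show (0:Int) ≤ 2 ^ 32 by norm_num)]
    omega

lemma pvDone_iff (e : Int × Int) (t : Int) (ht : 0 ≤ t) (h : 0 < e.2 ∨ (100 ≤ e.1 ∧ 0 ≤ e.2)) :
    (100 ≤ pvShift t e) ↔ pvDays e ≤ t := by
  unfold pvShift pvDays
  split_ifs with h1
  · constructor
    · intro _
      exact ht
    · intro _
      have he2 : 0 ≤ e.2 := by
        rcases h with h | h
        · omega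
        · omega
      nlinarith [mul_nonneg ht he2]
  · have hpos : 0 < e.2 := by
      rcases h with h | h
      · exact h
      · omega
    constructor
    · intro hge
      have h2 : -t ≤ PySem.Int.floordiv (e.1 - 100) e.2 := by
        rw [PySem.Int.le_floordiv_iff_mul_le hpos]
        nlinarith
      omega
    · intro hle
      have h2 : -t ≤ PySem.Int.floordiv (e.1 - 100) e.2 := by omega
      rw [PySem.Int.le_floordiv_iff_mul_le hpos] at h2
      nlinarith

lemma pvZipWith_map (L : List (Int × Int)) (rest : List Int) (t : Int) :
    List.zipWith (· + ·) (L.map (pvShift t)) (L.map Prod.snd ++ rest) = L.map (pvShift (t + 1)) := by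
  induction L with
  | nil => simp
  | cons e L ih =>
    simp only [List.map_cons, List.cons_append, List.zipWith_cons_cons, ih]
    congr 1
    unfold pvShift
    ring

lemma pvAdvance_eq (fuel : Nat) (t : Int) (e : Int × Int) (L : List (Int × Int)) (rest : List Int)
    (ht : 0 ≤ t) (hg : pvGood (e :: L)) (hle : t ≤ pvDays e) (hf : pvDays e - t ≤ (fuel : Int)) :
    pvAdvance fuel ((e :: L).map (pvShift t)) ((e :: L).map Prod.snd ++ rest)
      = (e :: L).map (pvShift (pvDays e)) := by
  have hge : 0 < e.2 ∨ (100 ≤ e.1 ∧ 0 ≤ e.2) := hg e (by simp)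
  induction fuel generalizing t with
  | zero =>
    have : t = pvDays e := by simp at hf; omega
    subst this
    rfl
  | succ f ih =>
    by_cases hdone : 100 ≤ pvShift t e
    · have h1 : pvDays e ≤ t := (pvDone_iff e t ht hge).mp hdone
      have h2 : t = pvDays e := le_antisymm hle h1
      subst h2
      simp only [List.map_cons, pvAdvance]
      rw [if_neg (show ¬ pvShift (pvDays e) e < 100 by omega)]
    · have hlt : pvShift t e < 100 := by omega
      have hnd : ¬ pvDays e ≤ t := fun hc => hdone ((pvDone_iff e t ht hge).mpr hc)
      simp only [List.map_cons, pvAdvance, hlt, if_true, List.cons_append]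
      rw [show pvShift t e :: L.map (pvShift t) = ((e :: L).map (pvShift t)) from rfl]
      rw [show e.2 :: (L.map Prod.snd ++ rest) = ((e :: L).map Prod.snd ++ rest) from rfl]
      rw [pvZipWith_map (e :: L) rest t]
      exact ih (t + 1) (by omega) (by omega) (by push_cast at hf ⊢; omega)

lemma pvPop_noop (k : Nat) (p : Int) (ps ss : List Int) (c : Int) (h : p < 100) :
    pvPop k (p :: ps) ss c = (c, p :: ps, ss) := by
  induction k generalizing ss with
  | zero => rfl
  | succ k ih =>
    cases ss with
    | nil => rfl
    | cons s ss' =>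
      have : ¬ p ≥ 100 := by omega
      simp only [pvPop, this, if_false]
      exact ih (s :: ss')

lemma pvPop_nil (k : Nat) (ss : List Int) (c : Int) : pvPop k [] ss c = (c, [], ss) := by
  cases k <;> rfl

lemma pvPop_eq (L : List (Int × Int)) (k : Nat) (t c : Int) (rest : List Int) (hk : L.length ≤ k) :
    pvPop k (L.map (pvShift t)) (L.map Prod.snd ++ rest) c
      = (c + ((L.takeWhile (fun e => 100 ≤ pvShift t e)).length : Int),
         (L.dropWhile (fun e => 100 ≤ pvShift t e)).map (pvShift t),
         (L.dropWhile (fun e => 100 ≤ pvShift t e)).map Prod.snd ++ rest) := by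
  induction L generalizing k c with
  | nil => simp [pvPop_nil]
  | cons e L ih =>
    cases k with
    | zero => simp at hk
    | succ k =>
      by_cases hge : 100 ≤ pvShift t e
      · have hk' : L.length ≤ k := by simp at hk; omega
        simp only [List.map_cons, List.cons_append, pvPop, ge_iff_le, hge, if_true]
        simp only [List.takeWhile_cons, List.dropWhile_cons, hge, decide_true, if_true,
          List.length_cons]
        have hc : c + ((((L.takeWhile (fun e => decide (100 ≤ pvShift t e))).length + 1 : ℕ)) : ℤ)
            = c + 1 + (((L.takeWhile (fun e => decide (100 ≤ pvShift t e))).length : ℕ) : ℤ) := by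
          push_cast
          ring
        rw [hc]
        exact ih k (c + 1) hk'
      · have hlt : pvShift t e < 100 := by omega
        rw [show ((e :: L).map (pvShift t)) = pvShift t e :: L.map (pvShift t) from rfl]
        rw [pvPop_noop _ _ _ _ _ hlt]
        simp only [List.takeWhile_cons, List.dropWhile_cons, hge, decide_false,
          List.map_cons, List.cons_append]
        simp

lemma pvTakeWhile_congr {α : Type} (L : List α) (p q : α → Bool) (h : ∀ e ∈ L, p e = q e) :
    L.takeWhile p = L.takeWhile q ∧ L.dropWhile p = L.dropWhile q := by
  induction L with
  | nil => exact ⟨rfl, rfl⟩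
  | cons e L ih =>
    have he := h e (by simp)
    have ih' := ih (fun x hx => h x (by simp [hx]))
    by_cases hq : q e = true
    · simp [he, hq, ih'.1, ih'.2]
    · have hq' : q e = false := by
        cases hqe : q e
        · rfl
        · exact absurd hqe hq
      simp [he, hq']

lemma pvDropWhile_head {α : Type} (L : List α) (p : α → Bool) :
    ∀ e ∈ (L.dropWhile p).head?, p e = false := by
  induction L with
  | nil => simp
  | cons x L ih =>
    by_cases hp : p x = true
    · simpa [hp] using ih
    · have hp' : p x = false := by
        cases hpe : p x
        · rfl
        · exact absurd hpe hp
      simp [hp']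

lemma pvTakeWhile_map {α β : Type} (f : α → β) (p : β → Bool) (L : List α) :
    (L.map f).takeWhile p = (L.takeWhile (fun x => p (f x))).map f := by
  induction L with
  | nil => rfl
  | cons x L ih =>
    by_cases hp : p (f x) = true
    · simp [hp, ih]
    · have hp' : p (f x) = false := by
        cases hpe : p (f x)
        · rfl
        · exact absurd hpe hp
      simp [hp']

lemma pvDropWhile_map {α β : Type} (f : α → β) (p : β → Bool) (L : List α) :
    (L.map f).dropWhile p = (L.dropWhile (fun x => p (f x))).map f := by
  induction L with
  | nil => rfl
  | cons x L ih =>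
    by_cases hp : p (f x) = true
    · simp [hp, ih]
    · have hp' : p (f x) = false := by
        cases hpe : p (f x)
        · rfl
        · exact absurd hpe hp
      simp [hp']

lemma pvOuter_eq (fuel : Nat) (L : List (Int × Int)) (t : Int) (ans rest : List Int)
    (hg : pvGood L) (ht : 0 ≤ t) (hd : ∀ e ∈ L, -2147483648 ≤ e.1)
    (hfront : ∀ e ∈ L.head?, t ≤ pvDays e) (hf : L.length ≤ fuel) :
    pvOuter fuel (L.map (pvShift t)) (L.map Prod.snd ++ rest) ans = ans ++ pvGref (L.map pvDays) := by
  induction fuel generalizing L t ans rest with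
  | zero =>
    have : L = [] := List.eq_nil_of_length_eq_zero (by omega)
    subst this
    simp [pvOuter, pvGref]
  | succ f ih =>
    cases L with
    | nil => simp [pvOuter, pvGref]
    | cons e L =>
      have hge : 0 < e.2 ∨ (100 ≤ e.1 ∧ 0 ≤ e.2) := hg e (by simp)
      have htd : t ≤ pvDays e := hfront e (by simp)
      have hd0 : 0 ≤ pvDays e := le_trans ht htd
      have hadv : pvAdvance (2 ^ 32) ((e :: L).map (pvShift t)) ((e :: L).map Prod.snd ++ rest)
          = (e :: L).map (pvShift (pvDays e)) := by
        apply pvAdvance_eq _ t e L rest ht hg htd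
        have := pvDays_ub e hge (hd e (by simp))
        push_cast
        omega
      have hlen : ((e :: L).map (pvShift (pvDays e))).length = (e :: L).length := by
        simp
      have hpop := pvPop_eq (e :: L) (e :: L).length (pvDays e) 0 rest (le_refl _)
      -- run one outer cycle
      rw [show pvOuter (f + 1) ((e :: L).map (pvShift t)) ((e :: L).map Prod.snd ++ rest) ans =
          (if ((e :: L).map (pvShift t)).length > 0 then
            pvOuter f (pvPop (pvAdvance (2 ^ 32) ((e :: L).map (pvShift t)) ((e :: L).map Prod.snd ++ rest)).length
                (pvAdvance (2 ^ 32) ((e :: L).map (pvShift t)) ((e :: L).map Prod.snd ++ rest))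
                ((e :: L).map Prod.snd ++ rest) 0).2.1
              (pvPop (pvAdvance (2 ^ 32) ((e :: L).map (pvShift t)) ((e :: L).map Prod.snd ++ rest)).length
                (pvAdvance (2 ^ 32) ((e :: L).map (pvShift t)) ((e :: L).map Prod.snd ++ rest))
                ((e :: L).map Prod.snd ++ rest) 0).2.2
              (ans ++ [(pvPop (pvAdvance (2 ^ 32) ((e :: L).map (pvShift t)) ((e :: L).map Prod.snd ++ rest)).length
                (pvAdvance (2 ^ 32) ((e :: L).map (pvShift t)) ((e :: L).map Prod.snd ++ rest))
                ((e :: L).map Prod.snd ++ rest) 0).1])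
          else ans) from rfl]
      rw [hadv, hlen, hpop]
      have hcond : ((e :: L).map (pvShift t)).length > 0 := by simp
      rw [if_pos hcond]
      -- the head of the popped prefix is done at time pvDays e
      have hheadP : (100 ≤ pvShift (pvDays e) e) = True := by
        simp only [eq_iff_iff, iff_true]
        exact (pvDone_iff e (pvDays e) hd0 hge).mpr (le_refl _)
      -- switch predicate from 'done at pvDays e' to 'pvDays ≤ pvDays e'
      have hcong := pvTakeWhile_congr L (fun x => decide (100 ≤ pvShift (pvDays e) x))
          (fun x => decide (pvDays x ≤ pvDays e))
          (fun x hx => by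
            have := pvDone_iff x (pvDays e) hd0 (hg x (by simp [hx]))
            simp [this])
      simp only [List.takeWhile_cons, List.dropWhile_cons, hheadP, decide_true, if_true] at *
      rw [hcong.1, hcong.2]
      -- recurse on the remaining tasks
      have hsub : ∀ x ∈ L.dropWhile (fun x => decide (pvDays x ≤ pvDays e)), x ∈ e :: L := by
        intro x hx
        exact List.mem_cons_of_mem _ ((List.dropWhile_sublist _).subset hx)
      rw [ih (L.dropWhile (fun x => decide (pvDays x ≤ pvDays e))) (pvDays e) _ rest
            (fun x hx => hg x (hsub x hx)) hd0 (fun x hx => hd x (hsub x hx))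
            (fun x hx => by
              have hxh := pvDropWhile_head L (fun x => decide (pvDays x ≤ pvDays e)) x hx
              simp at hxh
              omega)
            (by
              have h1 := List.length_dropWhile_le (p := fun x => decide (pvDays x ≤ pvDays e)) (l := L)
              simp at hf
              omega)]
      -- match against pvGref
      rw [show ((e :: L).map pvDays) = pvDays e :: L.map pvDays from rfl]
      rw [pvGref]
      rw [pvTakeWhile_map pvDays (fun x => decide (x ≤ pvDays e)) L]
      rw [pvDropWhile_map pvDays (fun x => decide (x ≤ pvDays e)) L]
      rw [List.length_map]
      simp only [List.append_assoc, List.singleton_append, List.length_cons]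
      congr 2
      push_cast
      ring

lemma pvBStep_some (ans : List Int) (c k : Int) (e : Int × Int) :
    pvBStep (ans, some c, k) e =
      if pvDays e > c then (ans ++ [k], some (pvDays e), 1) else (ans, some c, k + 1) := by
  rfl

lemma pvBStep_none (ans : List Int) (k : Int) (e : Int × Int) :
    pvBStep (ans, none, k) e = (ans, some (pvDays e), 1) := by
  rfl

lemma pvBfold (L : List (Int × Int)) (ans : List Int) (c k : Int) (hk : 0 < k) :
    (if (L.foldl pvBStep (ans, some c, k)).2.2 ≠ 0 then
        (L.foldl pvBStep (ans, some c, k)).1 ++ [(L.foldl pvBStep (ans, some c, k)).2.2]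
      else (L.foldl pvBStep (ans, some c, k)).1)
      = ans ++ (k + ((L.takeWhile (fun e => pvDays e ≤ c)).length : Int))
          :: pvGref ((L.dropWhile (fun e => pvDays e ≤ c)).map pvDays) := by
  induction L generalizing ans c k with
  | nil =>
    simp only [List.foldl_nil, List.takeWhile_nil, List.dropWhile_nil, List.map_nil, pvGref]
    rw [if_pos (by omega)]
    simp
  | cons e L ih =>
    simp only [List.foldl_cons, pvBStep_some]
    by_cases hgt : pvDays e > c
    · rw [if_pos hgt]
      rw [ih (ans ++ [k]) (pvDays e) 1 (by omega)]
      have htw : (e :: L).takeWhile (fun e => decide (pvDays e ≤ c)) = [] := by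
        simp [List.takeWhile_cons]
        omega
      have hdw : (e :: L).dropWhile (fun e => decide (pvDays e ≤ c)) = e :: L := by
        simp [List.dropWhile_cons]
        omega
      rw [htw, hdw]
      rw [show ((e :: L).map pvDays) = pvDays e :: L.map pvDays from rfl]
      rw [pvGref]
      rw [pvTakeWhile_map pvDays (fun x => decide (x ≤ pvDays e)) L]
      rw [pvDropWhile_map pvDays (fun x => decide (x ≤ pvDays e)) L]
      simp [List.append_assoc]
    · rw [if_neg hgt]
      rw [ih ans c (k + 1) (by omega)]
      have hle : pvDays e ≤ c := by omega
      simp only [List.takeWhile_cons, List.dropWhile_cons, hle, decide_true, if_true,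
        List.length_cons]
      congr 2
      push_cast
      ring

lemma pvAlt_eq (ps ss : List Int) : solution_alt ps ss = pvGref ((ps.zip ss).map pvDays) := by
  unfold solution_alt
  cases hz : ps.zip ss with
  | nil => simp [pvGref]
  | cons e L =>
    simp only [List.foldl_cons, pvBStep_none]
    have := pvBfold L [] (pvDays e) 1 (by omega)
    simp only [ne_eq] at this ⊢
    rw [this]
    rw [show ((e :: L).map pvDays) = pvDays e :: L.map pvDays from rfl]
    rw [pvGref]
    rw [pvTakeWhile_map pvDays (fun x => decide (x ≤ pvDays e)) L]
    rw [pvDropWhile_map pvDays (fun x => decide (x ≤ pvDays e)) L]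
    simp

lemma pvFst_zip (ps ss : List Int) (h : ps.length ≤ ss.length) :
    (ps.zip ss).map Prod.fst = ps := by
  induction ps generalizing ss with
  | nil => simp
  | cons p ps ih =>
    cases ss with
    | nil => simp at h
    | cons s ss =>
      simp only [List.zip_cons_cons, List.map_cons, List.cons.injEq, true_and]
      exact ih ss (by simp at h; omega)

lemma pvSnd_zip (ps ss : List Int) (h : ps.length ≤ ss.length) :
    ((ps.zip ss).map Prod.snd) ++ ss.drop ps.length = ss := by
  induction ps generalizing ss with
  | nil => simp
  | cons p ps ih =>
    cases ss with
    | nil => simp at h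
    | cons s ss =>
      simp only [List.zip_cons_cons, List.map_cons, List.cons_append, List.length_cons,
        List.drop_succ_cons, List.cons.injEq, true_and]
      exact ih ss (by simp at h; omega)

-- ===== VERDICT (by name: the statement is the Claim_ definition above) =====
theorem solution_spec : Claim_equal_solution := by
  unfold Claim_equal_solution
  intro ps ss hdom hpre
  unfold Spec_solution
  obtain ⟨hlen, hgood⟩ := hpre
  simp only [Dom_solution, Bool.and_eq_true, List.all_eq_true, pvDomInt, decide_eq_true_eq] at hdom
  rw [pvAlt_eq]
  unfold solution
  have h1 : (ps.zip ss).map (pvShift 0) = ps := by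
    have hsh : pvShift 0 = Prod.fst := funext fun e => by simp [pvShift]
    rw [hsh, pvFst_zip ps ss hlen]
  have h2 : ((ps.zip ss).map Prod.snd) ++ ss.drop ps.length = ss := pvSnd_zip ps ss hlen
  have hlenzip : (ps.zip ss).length = ps.length := by
    rw [List.length_zip]
    omega
  have key := pvOuter_eq (ps.zip ss).length (ps.zip ss) 0 [] (ss.drop ps.length)
    hgood (le_refl _)
    (fun e he => (hdom.1 e.1 (List.of_mem_zip he).1).1)
    (fun e he => pvDays_nonneg e (hgood e (by
      cases hh : (ps.zip ss) with
      | nil => simp [hh] at he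
      | cons x L =>
        simp [hh] at he
        simp [he])))
    (le_refl _)
  rw [h1, h2, hlenzip] at key
  simpa using key
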